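-- pv_equiv track=rewrite | github.com/gitKnowsMe/PersonalAIAgent_backend | app/services/email/email_processor.py | _chunk_by_email_structure
-- ===== SOURCE A (Python) =====
-- from typing import List, Dict, Optional, Tuple, Any
--
-- def _chunk_by_email_structure(text: str, config: Dict) -> List[str]:
--     """Chunk email by natural structure (paragraphs, quoted sections)."""
--     chunks = []
--
--     # Split by double newlines (paragraphs)
--     paragraphs = text.split('\n\n')
--
--     current_chunk = ''
--     for paragraph in paragraphs:
--         paragraph = paragraph.strip()
--         if not paragraph:
--             continue
--
--         # Check if adding this paragraph would exceed chunk size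
--         potential_chunk = current_chunk + '\n\n' + paragraph if current_chunk else paragraph
--
--         if len(potential_chunk) <= config['chunk_size']:
--             current_chunk = potential_chunk
--         else:
--             # Save current chunk if it's substantial
--             if len(current_chunk) >= config['min_chunk_size']:
--                 chunks.append(current_chunk)
--
--             # Start new chunk with current paragraph
--             current_chunk = paragraph
--
--     # Add final chunk
--     if len(current_chunk) >= config['min_chunk_size']:
--         chunks.append(current_chunk)
--
--     return chunks
-- ===== SOURCE B (Python) =====
-- def _chunk_by_email_structure(text, config):
--     """Chunk email text: prefix sums over stripped paragraphs, binary search per chunk boundary."""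
--     paras = [p for p in (q.strip() for q in text.split('\n\n')) if p]
--     m = config['min_chunk_size']
--     if not paras:
--         return []
--     C = config['chunk_size']
--     # prefix sums of paragraph lengths
--     pre = [0]
--     for p in paras:
--         pre.append(pre[-1] + len(p))
--     n = len(paras)
--     chunks = []
--     i = 0
--     while i < n:
--         # largest e in [i+1, n] with len('\n\n'.join(paras[i:e])) <= C (default i+1):
--         # joined length = pre[e] - pre[i] + 2*(e-i-1), strictly increasing in e
--         lo, hi = i + 1, n
--         while lo < hi:
--             mid = (lo + hi + 1) // 2
--             if pre[mid] - pre[i] + 2 * (mid - i - 1) <= C: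
--                 lo = mid
--             else:
--                 hi = mid - 1
--         e = lo
--         chunk = '\n\n'.join(paras[i:e])
--         if len(chunk) >= m:
--             chunks.append(chunk)
--         i = e
--     return chunks
-- ===== Notes on version B (the rewrite author's own statement) =====
-- stated objective: alternative
-- what changed: B precomputes prefix sums of stripped-paragraph lengths and finds each chunk's end by binary search over the prefix-sum array (joined length is pre[e]-pre[i]+2*(e-i-1)), slicing and joining each chunk once, instead of A's single accumulator loop that grows the current chunk string and tests its length each paragraph.
-- intended difference: When min_chunk_size <= 0 and either no paragraph survives stripping or the first stripped paragraph is longer than chunk_size, A emits a spurious empty-string chunk (its initial current_chunk '') before the real chunks; B omits it, which is the intended behaviour since an empty chunk is useless. — e.g. on _chunk_by_email_structure("", [("min_chunk_size", 0)]): A returns [""], B returns []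
import Mathlib
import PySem

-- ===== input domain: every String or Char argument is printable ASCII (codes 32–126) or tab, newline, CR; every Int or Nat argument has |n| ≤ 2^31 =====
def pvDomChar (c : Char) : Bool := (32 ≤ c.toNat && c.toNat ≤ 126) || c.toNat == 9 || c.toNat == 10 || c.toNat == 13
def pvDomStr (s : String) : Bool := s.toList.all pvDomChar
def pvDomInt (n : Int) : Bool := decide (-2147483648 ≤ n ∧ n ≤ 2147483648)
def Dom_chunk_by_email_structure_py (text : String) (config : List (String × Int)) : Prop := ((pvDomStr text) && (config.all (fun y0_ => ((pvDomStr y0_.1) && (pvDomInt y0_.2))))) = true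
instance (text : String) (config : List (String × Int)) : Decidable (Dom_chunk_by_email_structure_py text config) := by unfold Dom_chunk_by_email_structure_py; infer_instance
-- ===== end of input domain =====

-- B finds chunk boundaries by binary search on prefix sums of stripped-paragraph lengths instead of A's growing-string accumulator loop; outside D_ (spurious empty chunk of A) the return values agree.


-- ===== PORT A =====
-- loop body of A: state = (chunks so far, current_chunk), strings as List Char
def pyChunkAStep (config : List (String × Int)) (st : List (List Char) × List Char)
    (paragraph : List Char) : List (List Char) × List Char :=
  let p := PySem.Chars.strip paragraph
  if p = [] then st
  else
    let potential := if st.2 ≠ [] then st.2 ++ '\n' :: '\n' :: p else p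
    if (PySem.Chars.len potential : Int) ≤ (config.lookup "chunk_size").getD 0 then
      (st.1, potential)
    else
      let chunks := if ((config.lookup "min_chunk_size").getD 0) ≤ (PySem.Chars.len st.2 : Int)
                    then st.1 ++ [st.2] else st.1
      (chunks, p)

def chunk_by_email_structure_py (text : String) (config : List (String × Int)) : List String :=
  let paragraphs := PySem.Chars.splitOn text.toList ['\n', '\n']
  let st := paragraphs.foldl (pyChunkAStep config) ([], [])
  let chunks := if ((config.lookup "min_chunk_size").getD 0) ≤ (PySem.Chars.len st.2 : Int)
                then st.1 ++ [st.2] else st.1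
  chunks.map String.ofList

-- ===== PORT B =====
-- inner while loop of B: binary search for the largest e in [lo,hi] whose prefix-sum condition
-- pre[e] - pre[i] + 2*(e-i-1) <= C holds (defaulting to lo); pre indices are always in range, so
-- pyGet? through getD 0 is exact here.  fuel is only a totality guard (any fuel >= hi - lo gives
-- the while loop's value; the caller passes enough).
def pyBSearch (pre : List Int) (C : Int) (i : Nat) : Nat → Nat → Nat → Nat
  | 0, lo, _ => lo
  | fuel + 1, lo, hi =>
    if lo < hi then
      let mid := (lo + hi + 1) / 2
      if (PySem.List.pyGet? pre (mid : Int)).getD 0 - (PySem.List.pyGet? pre (i : Int)).getD 0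
          + 2 * ((mid : Int) - (i : Int) - 1) ≤ C then
        pyBSearch pre C i fuel mid hi
      else
        pyBSearch pre C i fuel lo (mid - 1)
    else lo

-- outer while loop of B: i advances to e = pyBSearch …; paras[i:e] is (drop i).take (e-i)
-- (exact for these in-range nonnegative indices); the conditional append becomes list append.
-- fuel is again only a totality guard (enough for the loop's iterations, each advances i).
def pyBLoop (paras : List (List Char)) (pre : List Int) (C m : Int) : Nat → Nat → List (List Char)
  | 0, _ => []
  | fuel + 1, i =>
    if i < paras.length then
      let e := pyBSearch pre C i paras.length (i + 1) paras.length
      let chunk := PySem.Chars.join ['\n', '\n'] ((paras.drop i).take (e - i))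
      (if m ≤ (PySem.Chars.len chunk : Int) then [chunk] else []) ++ pyBLoop paras pre C m fuel e
    else []

def chunk_by_email_structure_py_alt (text : String) (config : List (String × Int)) : List String :=
  let paras := ((PySem.Chars.splitOn text.toList ['\n', '\n']).map PySem.Chars.strip).filter (· ≠ [])
  let m := (config.lookup "min_chunk_size").getD 0
  if paras = [] then []
  else
    let C := (config.lookup "chunk_size").getD 0
    -- pre = [0]; for p in paras: pre.append(pre[-1] + len(p))   (pre is never empty, so pyGet? -1 is exact)
    let pre := paras.foldl
      (fun pr p => pr ++ [(PySem.List.pyGet? pr (-1 : Int)).getD 0 + (PySem.Chars.len p : Int)]) [0]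
    (pyBLoop paras pre C m paras.length 0).map String.ofList

-- ===== PRECONDITION & SPEC =====
-- A raises KeyError when 'min_chunk_size' is absent, or when 'chunk_size' is absent and some
-- paragraph strips to non-empty (only then is config['chunk_size'] read); Pre_ excludes exactly those.
def Pre_chunk_by_email_structure_py (text : String) (config : List (String × Int)) : Prop :=
  (config.lookup "min_chunk_size").isSome = true ∧
  ((config.lookup "chunk_size").isSome = true ∨
    ∀ q ∈ PySem.Chars.splitOn text.toList ['\n', '\n'], PySem.Chars.strip q = [])
instance (text : String) (config : List (String × Int)) : Decidable (Pre_chunk_by_email_structure_py text config) := by unfold Pre_chunk_by_email_structure_py; infer_instance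

def pvWitness_chunk_by_email_structure_py : String × (List (String × Int)) :=
  ("", [("min_chunk_size", 1)])

-- When min_chunk_size <= 0 and either every paragraph strips to empty or the first stripped
-- non-empty paragraph is longer than chunk_size, A emits a spurious empty-string chunk (its
-- initial current_chunk '') before the real chunks; B omits it, the intended behaviour.
def D_chunk_by_email_structure_py (text : String) (config : List (String × Int)) : Prop :=
  (config.lookup "min_chunk_size").getD 0 ≤ 0 ∧
  ∀ p ∈ (PySem.Chars.splitOn text.toList ['\n', '\n']).find?
      (fun q => !(PySem.Chars.strip q).isEmpty),
    (config.lookup "chunk_size").getD 0 < ((PySem.Chars.strip p).length : Int)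
instance (text : String) (config : List (String × Int)) : Decidable (D_chunk_by_email_structure_py text config) := by unfold D_chunk_by_email_structure_py; infer_instance

def Spec_chunk_by_email_structure_py (text : String) (config : List (String × Int)) (out : List String) : Prop := ¬ D_chunk_by_email_structure_py text config → out = chunk_by_email_structure_py_alt text config
instance (text : String) (config : List (String × Int)) (out : List String) : Decidable (Spec_chunk_by_email_structure_py text config out) := by unfold Spec_chunk_by_email_structure_py; infer_instance

def pvDiffWitness_chunk_by_email_structure_py : String × (List (String × Int)) :=
  ("", [("min_chunk_size", 0)])
def pvDiffWitnessOut_chunk_by_email_structure_py : (List String) × (List String) := ([""], [])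

-- ===== CLAIM (what is proved, stated in full; the proofs are below) =====
def Claim_unchanged_chunk_by_email_structure_py : Prop := ∀ (text : String) (config : List (String × Int)), Dom_chunk_by_email_structure_py text config → Pre_chunk_by_email_structure_py text config → Spec_chunk_by_email_structure_py text config (chunk_by_email_structure_py text config)
def Claim_changed_chunk_by_email_structure_py : Prop := Dom_chunk_by_email_structure_py (pvDiffWitness_chunk_by_email_structure_py.1) (pvDiffWitness_chunk_by_email_structure_py.2) ∧ Pre_chunk_by_email_structure_py (pvDiffWitness_chunk_by_email_structure_py.1) (pvDiffWitness_chunk_by_email_structure_py.2) ∧ D_chunk_by_email_structure_py (pvDiffWitness_chunk_by_email_structure_py.1) (pvDiffWitness_chunk_by_email_structure_py.2) ∧ chunk_by_email_structure_py (pvDiffWitness_chunk_by_email_structure_py.1) (pvDiffWitness_chunk_by_email_structure_py.2) = pvDiffWitnessOut_chunk_by_email_structure_py.1 ∧ chunk_by_email_structure_py_alt (pvDiffWitness_chunk_by_email_structure_py.1) (pvDiffWitness_chunk_by_email_structure_py.2) = pvDiffWitnessOut_chunk_by_email_structure_py.2 ∧ pvDiffWitnessOut_chunk_by_email_structure_py.1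 ≠ pvDiffWitnessOut_chunk_by_email_structure_py.2
def Claim_exact_chunk_by_email_structure_py : Prop := ∀ (text : String) (config : List (String × Int)), Dom_chunk_by_email_structure_py text config → Pre_chunk_by_email_structure_py text config → D_chunk_by_email_structure_py text config → chunk_by_email_structure_py text config ≠ chunk_by_email_structure_py_alt text config

-- ===== LEMMAS AND PROOFS =====

-- shared reference: greedy chunking over the list of stripped non-empty paragraphs
def gGo (C : Int) (cur : List (List Char)) : List (List Char) → List (List Char)
  | [] => [PySem.Chars.join ['\n', '\n'] cur]
  | q :: rest =>
    if (PySem.Chars.len (PySem.Chars.join ['\n', '\n'] (cur ++ [q])) : Int) ≤ C then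
      gGo C (cur ++ [q]) rest
    else
      PySem.Chars.join ['\n', '\n'] cur :: gGo C [q] rest

def gr (C : Int) : List (List Char) → List (List Char)
  | [] => []
  | p :: rest => gGo C [p] rest

def fltMin (m : Int) (l : List (List Char)) : List (List Char) :=
  l.filter (fun c => m ≤ (PySem.Chars.len c : Int))

theorem join2_append_singleton (g : List (List Char)) (p : List Char) :
    PySem.Chars.join ['\n', '\n'] (g ++ [p])
      = if g = [] then p else PySem.Chars.join ['\n', '\n'] g ++ '\n' :: '\n' :: p := by
  induction g with
  | nil => simp [PySem.Chars.join_singleton]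
  | cons x xs ih =>
    cases xs with
    | nil => simp [PySem.Chars.join_cons_cons, PySem.Chars.join_singleton]
    | cons y ys =>
      simp only [List.cons_append, PySem.Chars.join_cons_cons] at *
      simp [ih]


-- ---------- A-side: A's fold equals fltMin of the greedy reference ----------

-- A's loop body once the strip/skip of empty paragraphs is factored out
def pyChunkAStep' (config : List (String × Int)) (st : List (List Char) × List Char)
    (p : List Char) : List (List Char) × List Char :=
  let potential := if st.2 ≠ [] then st.2 ++ '\n' :: '\n' :: p else p
  if (PySem.Chars.len potential : Int) ≤ (config.lookup "chunk_size").getD 0 then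
    (st.1, potential)
  else
    (if ((config.lookup "min_chunk_size").getD 0) ≤ (PySem.Chars.len st.2 : Int)
     then st.1 ++ [st.2] else st.1, p)

theorem foldA_filter (config : List (String × Int)) :
    ∀ (raws : List (List Char)) (st : List (List Char) × List Char),
    raws.foldl (pyChunkAStep config) st
      = ((raws.map PySem.Chars.strip).filter (· ≠ [])).foldl (pyChunkAStep' config) st := by
  intro raws
  induction raws with
  | nil => intro st; rfl
  | cons r rs ih =>
    intro st
    have hstep : pyChunkAStep config st r
        = if PySem.Chars.strip r = [] then st else pyChunkAStep' config st (PySem.Chars.strip r) := by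
      unfold pyChunkAStep pyChunkAStep'
      by_cases h : PySem.Chars.strip r = [] <;> simp [h]
    by_cases h : PySem.Chars.strip r = []
    · simp [List.foldl, hstep, h, ih]
    · simp [List.foldl, hstep, h, ih]

theorem foldA_gGo (config : List (String × Int)) :
    ∀ (ps : List (List Char)) (curL : List (List Char)) (chunks : List (List Char)),
    (∀ p ∈ ps, p ≠ []) → curL ≠ [] → PySem.Chars.join ['\n', '\n'] curL ≠ [] →
    (let st := ps.foldl (pyChunkAStep' config) (chunks, PySem.Chars.join ['\n', '\n'] curL);
     (if ((config.lookup "min_chunk_size").getD 0) ≤ (PySem.Chars.len st.2 : Int)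
      then st.1 ++ [st.2] else st.1)
       = chunks ++ fltMin ((config.lookup "min_chunk_size").getD 0)
           (gGo ((config.lookup "chunk_size").getD 0) curL ps)) := by
  intro ps
  induction ps with
  | nil =>
    intro curL chunks _ _ _
    simp only [List.foldl, gGo, fltMin, List.filter_cons, List.filter_nil, PySem.Chars.len_eq]
    by_cases h : ((config.lookup "min_chunk_size").getD 0)
        ≤ ((PySem.Chars.join ['\n', '\n'] curL).length : Int)
    · simp [h]
    · simp [h]
  | cons q rest ih =>
    intro curL chunks hps hcur hj
    have hq : q ≠ [] := hps q (by simp)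
    have hrest : ∀ p ∈ rest, p ≠ [] := fun p hp => hps p (by simp [hp])
    have hpot : (if PySem.Chars.join ['\n', '\n'] curL ≠ []
        then PySem.Chars.join ['\n', '\n'] curL ++ '\n' :: '\n' :: q else q)
        = PySem.Chars.join ['\n', '\n'] (curL ++ [q]) := by
      rw [join2_append_singleton]
      simp [hcur, hj]
    simp only [List.foldl, pyChunkAStep', hpot]
    by_cases hc : (PySem.Chars.len (PySem.Chars.join ['\n', '\n'] (curL ++ [q])) : Int)
        ≤ (config.lookup "chunk_size").getD 0
    · rw [if_pos hc]
      have hj' : PySem.Chars.join ['\n', '\n'] (curL ++ [q]) ≠ [] := by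
        rw [join2_append_singleton]; simp [hcur, hj]
      have step := ih (curL ++ [q]) chunks hrest (by simp) hj'
      simp only at step
      rw [step, gGo, if_pos hc]
    · rw [if_neg hc]
      have hjq : PySem.Chars.join ['\n', '\n'] [q] = q := PySem.Chars.join_singleton _ _
      have step := ih [q] (if ((config.lookup "min_chunk_size").getD 0)
          ≤ (PySem.Chars.len (PySem.Chars.join ['\n', '\n'] curL) : Int)
          then chunks ++ [PySem.Chars.join ['\n', '\n'] curL] else chunks)
        hrest (by simp) (by rw [hjq]; exact hq)
      simp only [hjq] at step
      rw [step, gGo, if_neg hc]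
      simp only [fltMin, List.filter_cons, PySem.Chars.len_eq]
      by_cases hm : ((config.lookup "min_chunk_size").getD 0)
          ≤ ((PySem.Chars.join ['\n', '\n'] curL).length : Int)
      · simp [hm]
      · simp [hm]

-- A as pre-chunk (the spurious '' when D_ holds) ++ filtered greedy chunks
theorem A_eq (text : String) (config : List (String × Int)) :
    chunk_by_email_structure_py text config
      = (let paras := ((PySem.Chars.splitOn text.toList ['\n', '\n']).map PySem.Chars.strip).filter (· ≠ []);
         let C := (config.lookup "chunk_size").getD 0;
         let m := (config.lookup "min_chunk_size").getD 0;
         ((if m ≤ 0 ∧ (paras = [] ∨ C < (paras.headI.length : Int)) then [([] : List Char)] else [])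
           ++ fltMin m (gr C paras)).map String.ofList) := by
  unfold chunk_by_email_structure_py
  simp only
  rw [foldA_filter]
  generalize hparas : ((PySem.Chars.splitOn text.toList ['\n', '\n']).map PySem.Chars.strip).filter (· ≠ []) = paras
  have hne : ∀ p ∈ paras, p ≠ [] := by
    intro p hp
    rw [← hparas] at hp
    simpa using (List.of_mem_filter hp)
  cases paras with
  | nil =>
    simp only [List.foldl, gr, fltMin, List.filter_nil, List.append_nil]
    by_cases h : ((config.lookup "min_chunk_size").getD 0) ≤ (0 : Int)
    · simp [PySem.Chars.len_eq, h, String.ofList]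
    · simp [PySem.Chars.len_eq, h]
  | cons p rest =>
    have hp : p ≠ [] := hne p (by simp)
    have hrest : ∀ x ∈ rest, x ≠ [] := fun x hx => hne x (by simp [hx])
    have hstep0 : pyChunkAStep' config ([], []) p
        = (if (PySem.Chars.len p : Int) ≤ (config.lookup "chunk_size").getD 0
           then (([] : List (List Char)), p)
           else ((if ((config.lookup "min_chunk_size").getD 0) ≤ (0 : Int)
                  then [([] : List Char)] else []), p)) := by
      unfold pyChunkAStep'
      simp [PySem.Chars.len_eq]
    simp only [List.foldl, hstep0]
    by_cases hc : (PySem.Chars.len p : Int) ≤ (config.lookup "chunk_size").getD 0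
    · rw [if_pos hc]
      have hJp : PySem.Chars.join ['\n', '\n'] [p] = p := PySem.Chars.join_singleton _ _
      have step := foldA_gGo config rest [p] [] hrest (by simp) (by rw [hJp]; exact hp)
      simp only [hJp] at step
      rw [step]
      have hnotD : ¬ (((config.lookup "min_chunk_size").getD 0) ≤ 0
          ∧ ((p :: rest : List (List Char)) = [] ∨ (config.lookup "chunk_size").getD 0
              < (((p :: rest : List (List Char)).headI.length : Int)))) := by
        rintro ⟨-, h | h⟩
        · exact absurd h (by simp)
        · simp only [List.headI] at h
          rw [PySem.Chars.len_eq] at hc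
          omega
      rw [if_neg hnotD, gr]
    · rw [if_neg hc]
      have hJp : PySem.Chars.join ['\n', '\n'] [p] = p := PySem.Chars.join_singleton _ _
      have step := foldA_gGo config rest [p]
        (if ((config.lookup "min_chunk_size").getD 0) ≤ (0 : Int) then [([] : List Char)] else [])
        hrest (by simp) (by rw [hJp]; exact hp)
      simp only [hJp] at step
      rw [step]
      have hD : (((config.lookup "min_chunk_size").getD 0) ≤ 0
          ∧ ((p :: rest : List (List Char)) = [] ∨ (config.lookup "chunk_size").getD 0
              < (((p :: rest : List (List Char)).headI.length : Int))))
          ↔ ((config.lookup "min_chunk_size").getD 0) ≤ 0 := by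
        rw [PySem.Chars.len_eq] at hc
        simp only [List.headI]
        constructor
        · exact fun h => h.1
        · exact fun h => ⟨h, Or.inr (by omega)⟩
      rw [gr]
      by_cases hm : ((config.lookup "min_chunk_size").getD 0) ≤ (0 : Int)
      · rw [if_pos hm, if_pos (hD.mpr hm)]
      · rw [if_neg hm, if_neg (fun h => hm (hD.mp h))]


-- ---------- B-side: prefix sums, binary search, and the greedy reference ----------

def presumN (paras : List (List Char)) (k : Nat) : Nat := ((paras.take k).map List.length).sum

def scanFrom (s : Int) : List (List Char) → List Int
  | [] => []
  | p :: rest => (s + (p.length : Int)) :: scanFrom (s + (p.length : Int)) rest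

theorem scanFrom_length (l : List (List Char)) : ∀ s, (scanFrom s l).length = l.length := by
  induction l with
  | nil => intro s; rfl
  | cons p rest ih => intro s; simp [scanFrom, ih]

theorem foldPre_scan : ∀ (l : List (List Char)) (acc : List Int), acc ≠ [] →
    l.foldl (fun pr p => pr ++ [(PySem.List.pyGet? pr (-1 : Int)).getD 0 + (PySem.Chars.len p : Int)]) acc
      = acc ++ scanFrom (acc.getLast?.getD 0) l := by
  intro l
  induction l with
  | nil => intro acc _; simp [scanFrom]
  | cons p rest ih =>
    intro acc hacc
    have hget : (PySem.List.pyGet? acc (-1 : Int)).getD 0 = acc.getLast?.getD 0 := by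
      rw [PySem.List.pyGet?_neg_one]
    simp only [List.foldl, hget]
    have hlast : (acc ++ [acc.getLast?.getD 0 + (PySem.Chars.len p : Int)]).getLast?.getD 0
        = acc.getLast?.getD 0 + (PySem.Chars.len p : Int) := by
      simp
    rw [ih (acc ++ [acc.getLast?.getD 0 + (PySem.Chars.len p : Int)]) (by simp), hlast]
    simp [scanFrom, PySem.Chars.len_eq]

theorem scan_getD : ∀ (l : List (List Char)) (s : Int) (k : Nat), k < l.length →
    (scanFrom s l).getD k 0 = s + (presumN l (k + 1) : Int) := by
  intro l
  induction l with
  | nil => intro s k h; simp at h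
  | cons p rest ih =>
    intro s k h
    cases k with
    | zero => simp [scanFrom, presumN]
    | succ j =>
      have hj : j < rest.length := by simpa using h
      simp only [scanFrom, List.getD_cons_succ, ih _ j hj, presumN, List.take_succ_cons,
        List.map_cons, List.sum_cons]
      push_cast
      ring

theorem pre_getD (paras : List (List Char)) : ∀ k : Nat, k ≤ paras.length →
    (PySem.List.pyGet?
      (paras.foldl (fun pr p => pr ++ [(PySem.List.pyGet? pr (-1 : Int)).getD 0 + (PySem.Chars.len p : Int)]) [0])
      (k : Int)).getD 0 = (presumN paras k : Int) := by
  intro k hk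
  rw [foldPre_scan paras [0] (by simp)]
  simp only [List.getLast?_singleton, Option.getD_some, List.singleton_append,
    PySem.List.pyGet?_natCast]
  cases k with
  | zero => simp [presumN]
  | succ j =>
    have hj : j < paras.length := by omega
    have hlen : j < (scanFrom 0 paras).length := by rw [scanFrom_length]; exact hj
    rw [List.getElem?_cons_succ]
    rw [List.getElem?_eq_getElem hlen]
    have := scan_getD paras 0 j hj
    rw [List.getD, List.getElem?_eq_getElem hlen] at this
    simpa using this

-- the condition the binary search tests, as read from the prefix-sum array
def condP (pre : List Int) (C : Int) (i e : Nat) : Prop :=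
  (PySem.List.pyGet? pre (e : Int)).getD 0 - (PySem.List.pyGet? pre (i : Int)).getD 0
    + 2 * ((e : Int) - (i : Int) - 1) ≤ C

theorem pyBSearch_char (pre : List Int) (C : Int) (i : Nat) :
    ∀ (fuel lo hi : Nat), lo ≤ hi → hi - lo ≤ fuel →
    lo ≤ pyBSearch pre C i fuel lo hi ∧ pyBSearch pre C i fuel lo hi ≤ hi ∧
    (lo < pyBSearch pre C i fuel lo hi → condP pre C i (pyBSearch pre C i fuel lo hi)) ∧
    (pyBSearch pre C i fuel lo hi < hi → ¬ condP pre C i (pyBSearch pre C i fuel lo hi + 1)) := by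
  intro fuel
  induction fuel with
  | zero =>
    intro lo hi hle hf
    have : lo = hi := by omega
    subst this
    exact ⟨le_refl _, le_refl _, by simp [pyBSearch], by simp [pyBSearch]⟩
  | succ fuel ih =>
    intro lo hi hle hf
    by_cases h : lo < hi
    · have hmid : lo + 1 ≤ (lo + hi + 1) / 2 ∧ (lo + hi + 1) / 2 ≤ hi := by omega
      rw [pyBSearch]
      simp only [if_pos h]
      by_cases hc : (PySem.List.pyGet? pre (((lo + hi + 1) / 2 : Nat) : Int)).getD 0
          - (PySem.List.pyGet? pre (i : Int)).getD 0
          + 2 * ((((lo + hi + 1) / 2 : Nat) : Int) - (i : Int) - 1) ≤ C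
      · rw [if_pos hc]
        obtain ⟨h1, h2, h3, h4⟩ := ih ((lo + hi + 1) / 2) hi (by omega) (by omega)
        refine ⟨by omega, h2, fun _ => ?_, h4⟩
        rcases Nat.lt_or_ge ((lo + hi + 1) / 2) (pyBSearch pre C i fuel ((lo + hi + 1) / 2) hi) with hlt | hge
        · exact h3 hlt
        · have heq : pyBSearch pre C i fuel ((lo + hi + 1) / 2) hi = (lo + hi + 1) / 2 := by omega
          rw [heq]; exact hc
      · rw [if_neg hc]
        obtain ⟨h1, h2, h3, h4⟩ := ih lo ((lo + hi + 1) / 2 - 1) (by omega) (by omega)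
        refine ⟨h1, by omega, h3, fun _ => ?_⟩
        rcases Nat.lt_or_ge (pyBSearch pre C i fuel lo ((lo + hi + 1) / 2 - 1)) ((lo + hi + 1) / 2 - 1) with hlt | hge
        · exact h4 hlt
        · have heq : pyBSearch pre C i fuel lo ((lo + hi + 1) / 2 - 1) + 1 = (lo + hi + 1) / 2 := by omega
          rw [heq]; exact hc
    · rw [pyBSearch]
      simp only [if_neg h]
      exact ⟨le_refl _, by omega, by omega, by omega⟩

theorem len_join2 : ∀ ps : List (List Char), ps ≠ [] →
    (PySem.Chars.join ['\n', '\n'] ps).length = (ps.map List.length).sum + 2 * (ps.length - 1) := by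
  intro ps
  induction ps with
  | nil => intro h; exact absurd rfl h
  | cons p rest ih =>
    intro _
    cases rest with
    | nil => simp [PySem.Chars.join_singleton]
    | cons q rest' =>
      rw [PySem.Chars.join_cons_cons]
      have := ih (by simp)
      simp only [List.map_cons, List.sum_cons, List.length_cons] at *
      simp [this]
      omega

theorem take_split (paras : List (List Char)) (i e : Nat) (h1 : i ≤ e) :
    paras.take e = paras.take i ++ (paras.drop i).take (e - i) := by
  have : e = i + (e - i) := by omega
  rw [this, List.take_add]
  simp

theorem sum_take_split (paras : List (List Char)) (i e : Nat) (h1 : i ≤ e) :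
    presumN paras e = presumN paras i + (((paras.drop i).take (e - i)).map List.length).sum := by
  unfold presumN
  rw [take_split paras i e h1]
  simp

theorem presumN_mono (paras : List (List Char)) (i e : Nat) (h1 : i ≤ e) :
    presumN paras i ≤ presumN paras e := by
  rw [sum_take_split paras i e h1]; omega

theorem slice_length (paras : List (List Char)) (i e : Nat) (h1 : i ≤ e) (h2 : e ≤ paras.length) :
    ((paras.drop i).take (e - i)).length = e - i := by
  simp [List.length_take, List.length_drop]
  omega

theorem slice_ext (paras : List (List Char)) (i k : Nat) (h1 : i ≤ k) (h2 : k < paras.length) :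
    (paras.drop i).take (k - i) ++ [paras[k]] = (paras.drop i).take (k + 1 - i) := by
  have hk : k + 1 - i = (k - i) + 1 := by omega
  rw [hk, List.take_add_one]
  have hidx : k - i < (paras.drop i).length := by simp [List.length_drop]; omega
  rw [List.getElem?_eq_getElem hidx]
  congr 1
  simp [List.getElem_drop]
  congr 1
  omega

theorem gr_nil (C : Int) : gr C [] = [] := rfl

theorem gr_cons (C : Int) (p : List Char) (rest : List (List Char)) :
    gr C (p :: rest) = gGo C [p] rest := rfl

theorem gGo_nil (C : Int) (cur : List (List Char)) :
    gGo C cur [] = [PySem.Chars.join ['\n', '\n'] cur] := rfl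

theorem gGo_cons (C : Int) (cur : List (List Char)) (q : List Char) (rest : List (List Char)) :
    gGo C cur (q :: rest)
      = if (PySem.Chars.len (PySem.Chars.join ['\n', '\n'] (cur ++ [q])) : Int) ≤ C then
          gGo C (cur ++ [q]) rest
        else PySem.Chars.join ['\n', '\n'] cur :: gGo C [q] rest := rfl

theorem condP_iff_len (paras : List (List Char)) (pre : List Int) (C : Int) (i e : Nat)
    (hpre : ∀ k : Nat, k ≤ paras.length → (PySem.List.pyGet? pre (k : Int)).getD 0 = (presumN paras k : Int))
    (hi : i < e) (he : e ≤ paras.length) :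
    condP pre C i e ↔ ((PySem.Chars.join ['\n', '\n'] ((paras.drop i).take (e - i))).length : Int) ≤ C := by
  have hslice_ne : (paras.drop i).take (e - i) ≠ [] := by
    have := slice_length paras i e (by omega) he
    intro hnil; rw [hnil] at this; simp at this; omega
  have hlen := len_join2 _ hslice_ne
  have hsum := sum_take_split paras i e (by omega)
  have hsl := slice_length paras i e (by omega) he
  unfold condP
  rw [hpre e he, hpre i (by omega)]
  rw [hlen, hsl, hsum]
  have hm := presumN_mono paras i e (by omega)
  push_cast
  omega

-- joined slice length is monotone in the right endpoint
theorem len_slice_mono (paras : List (List Char)) (i j e : Nat)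
    (hij : i < j) (hje : j ≤ e) (he : e ≤ paras.length)
    (hce : ((PySem.Chars.join ['\n', '\n'] ((paras.drop i).take (e - i))).length : Int) ≤ C) :
    ((PySem.Chars.join ['\n', '\n'] ((paras.drop i).take (j - i))).length : Int) ≤ C := by
  have hsj := sum_take_split paras i j (by omega)
  have hse := sum_take_split paras i e (by omega)
  have hljs := slice_length paras i j (by omega) (by omega)
  have hles := slice_length paras i e (by omega) he
  have hmono2 := presumN_mono paras j e hje
  have hlj := len_join2 ((paras.drop i).take (j - i)) (by
    intro hnil
    have := slice_length paras i j (by omega) (by omega)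
    rw [hnil] at this; simp at this; omega)
  have hle := len_join2 ((paras.drop i).take (e - i)) (by
    intro hnil
    have := slice_length paras i e (by omega) he
    rw [hnil] at this; simp at this; omega)
  rw [hlj, hljs]
  rw [hle, hles] at hce
  have hkey : (((paras.drop i).take (j - i)).map List.length).sum + 2 * ((j - i) - 1)
      ≤ (((paras.drop i).take (e - i)).map List.length).sum + 2 * ((e - i) - 1) := by omega
  exact le_trans (by exact_mod_cast Int.ofNat_le.mpr hkey) hce

theorem gGo_split (C : Int) (paras : List (List Char)) (i : Nat) :
    ∀ (d k e : Nat), d = e - k → i < k → k ≤ e → e ≤ paras.length →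
    (∀ j, k < j → j ≤ e →
      ((PySem.Chars.join ['\n', '\n'] ((paras.drop i).take (j - i))).length : Int) ≤ C) →
    (e < paras.length →
      ¬ ((PySem.Chars.join ['\n', '\n'] ((paras.drop i).take (e + 1 - i))).length : Int) ≤ C) →
    gGo C ((paras.drop i).take (k - i)) (paras.drop k)
      = PySem.Chars.join ['\n', '\n'] ((paras.drop i).take (e - i)) :: gr C (paras.drop e) := by
  intro d
  induction d with
  | zero =>
    intro k e hd hik hke hen _ h2
    have hke' : k = e := by omega
    subst hke'
    rcases Nat.lt_or_ge k paras.length with hlt | hge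
    · conv_lhs => rw [List.drop_eq_getElem_cons hlt]
      rw [gGo_cons, slice_ext paras i k (by omega) hlt,
        if_neg (by simpa [PySem.Chars.len_eq] using h2 hlt)]
      conv_rhs => rw [List.drop_eq_getElem_cons hlt]
      rw [gr_cons]
    · have hnil : paras.drop k = [] := List.drop_eq_nil_of_le hge
      rw [hnil, gGo_nil, gr_nil]
  | succ d ih =>
    intro k e hd hik hke hen h1 h2
    have hkn : k < paras.length := by omega
    conv_lhs => rw [List.drop_eq_getElem_cons hkn]
    rw [gGo_cons, slice_ext paras i k (by omega) hkn,
      if_pos (by simpa [PySem.Chars.len_eq] using h1 (k+1) (by omega) (by omega))]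
    exact ih (k+1) e (by omega) (by omega) (by omega) hen
      (fun j hj1 hj2 => h1 j (by omega) hj2) h2

theorem bloop_eq (paras : List (List Char)) (pre : List Int) (C m : Int)
    (hpre : ∀ k : Nat, k ≤ paras.length → (PySem.List.pyGet? pre (k : Int)).getD 0 = (presumN paras k : Int)) :
    ∀ (fuel i : Nat), paras.length - i ≤ fuel →
    pyBLoop paras pre C m fuel i = fltMin m (gr C (paras.drop i)) := by
  intro fuel
  induction fuel with
  | zero =>
    intro i hf
    have hnil : paras.drop i = [] := List.drop_eq_nil_of_le (by omega)
    rw [hnil]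
    simp [pyBLoop, gr_nil, fltMin]
  | succ fuel ih =>
    intro i hf
    by_cases h : i < paras.length
    · rw [pyBLoop]
      simp only [if_pos h]
      obtain ⟨h1, h2, h3, h4⟩ :=
        pyBSearch_char pre C i paras.length (i+1) paras.length (by omega) (by omega)
      set e := pyBSearch pre C i paras.length (i + 1) paras.length with he
      have hmono : ∀ j, i + 1 < j → j ≤ e →
          ((PySem.Chars.join ['\n', '\n'] ((paras.drop i).take (j - i))).length : Int) ≤ C := by
        intro j hj1 hj2
        have hlt : i + 1 < e := by omega
        have hce : condP pre C i e := h3 hlt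
        rw [condP_iff_len paras pre C i e hpre (by omega) h2] at hce
        exact len_slice_mono paras i j e (by omega) hj2 h2 hce
      have hnot : e < paras.length →
          ¬ ((PySem.Chars.join ['\n', '\n'] ((paras.drop i).take (e + 1 - i))).length : Int) ≤ C := by
        intro hlt hlen
        exact h4 hlt ((condP_iff_len paras pre C i (e+1) hpre (by omega) (by omega)).mpr hlen)
      have hsplit := gGo_split C paras i (e - (i+1)) (i+1) e rfl (by omega) h1 h2 hmono hnot
      have htake1 : (paras.drop i).take (i + 1 - i) = [paras[i]] := by
        have hx := slice_ext paras i i (le_refl i) h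
        simpa using hx.symm
      rw [htake1] at hsplit
      conv_rhs => rw [List.drop_eq_getElem_cons h]
      rw [gr_cons, hsplit]
      simp only [fltMin, List.filter_cons, PySem.Chars.len_eq]
      rw [ih e (by omega)]
      by_cases hm : m ≤ ((PySem.Chars.join ['\n', '\n'] ((paras.drop i).take (e - i))).length : Int)
      · simp only [fltMin]
        simp [hm]
      · simp only [fltMin]
        simp [hm]
    · rw [pyBLoop]
      simp only [if_neg h]
      have hnil : paras.drop i = [] := List.drop_eq_nil_of_le (by omega)
      rw [hnil]
      simp [gr_nil, fltMin]

theorem B_eq (text : String) (config : List (String × Int)) :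
    chunk_by_email_structure_py_alt text config
      = (let paras := ((PySem.Chars.splitOn text.toList ['\n', '\n']).map PySem.Chars.strip).filter (· ≠ []);
         (fltMin ((config.lookup "min_chunk_size").getD 0)
           (gr ((config.lookup "chunk_size").getD 0) paras)).map String.ofList) := by
  unfold chunk_by_email_structure_py_alt
  simp only
  generalize hparas : ((PySem.Chars.splitOn text.toList ['\n', '\n']).map PySem.Chars.strip).filter (· ≠ []) = paras
  by_cases hp : paras = []
  · rw [if_pos hp, hp]
    simp [gr_nil, fltMin]
  · rw [if_neg hp]
    rw [bloop_eq paras _ _ _ (pre_getD paras) paras.length 0 (by omega)]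
    simp

-- bridging the find?-based D_ to the filtered-paragraph form used by A_eq/B_eq
theorem find?_filter_bridge (C : Int) : ∀ l : List (List Char),
    (∀ p ∈ l.find? (fun q => !(PySem.Chars.strip q).isEmpty),
        C < ((PySem.Chars.strip p).length : Int))
      ↔ ((l.map PySem.Chars.strip).filter (· ≠ []) = []
          ∨ C < ((((l.map PySem.Chars.strip).filter (· ≠ [])).headI.length : Int))) := by
  intro l
  induction l with
  | nil => simp
  | cons q rest ih =>
    by_cases hq : PySem.Chars.strip q = []
    · rw [List.find?_cons_of_neg (by simp [hq])]
      simp only [List.map_cons, List.filter_cons]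
      rw [if_neg (by simp [hq])]
      exact ih
    · rw [List.find?_cons_of_pos (by simpa using hq)]
      simp only [List.map_cons, List.filter_cons]
      rw [if_pos (by simpa using hq)]
      simp [hq]

theorem D_iff (text : String) (config : List (String × Int)) :
    D_chunk_by_email_structure_py text config
      ↔ ((config.lookup "min_chunk_size").getD 0 ≤ 0
          ∧ (((PySem.Chars.splitOn text.toList ['\n', '\n']).map PySem.Chars.strip).filter (· ≠ []) = []
             ∨ (config.lookup "chunk_size").getD 0
                 < (((((PySem.Chars.splitOn text.toList ['\n', '\n']).map PySem.Chars.strip).filter (· ≠ [])).headI.length : Int)))) := by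
  unfold D_chunk_by_email_structure_py
  rw [find?_filter_bridge]

-- ===== VERDICT (by name: the statement is the Claim_ definition above) =====
theorem chunk_by_email_structure_py_spec : Claim_unchanged_chunk_by_email_structure_py := by
  intro text config _ _
  unfold Spec_chunk_by_email_structure_py
  intro hD
  rw [A_eq, B_eq]
  simp only
  rw [if_neg (fun hc => hD ((D_iff text config).mpr hc))]
  simp
theorem chunk_by_email_structure_py_changed : Claim_changed_chunk_by_email_structure_py := by
  unfold Claim_changed_chunk_by_email_structure_py; decide
theorem chunk_by_email_structure_py_tight : Claim_exact_chunk_by_email_structure_py := by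
  intro text config _ _ hD
  rw [A_eq, B_eq]
  simp only
  rw [if_pos ((D_iff text config).mp hD)]
  intro h
  have := congrArg List.length h
  simp at this
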